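-- pv_equiv track=rewrite | github.com/pwviptbl/ReconForge | plugins/sqlmap_scanner.py | _check_vulnerability_in_output
-- ===== SOURCE A (Python) =====
-- def _check_vulnerability_in_output(output: str) -> bool:
--     """Verifica se SQLMap encontrou vulnerabilidades"""
--     vulnerability_indicators = [
--         'is vulnerable',
--         'injectable parameter',
--         'Parameter:',
--         'Type:',
--         'Title:',
--         'Payload:',
--         'sqlmap identified the following injection point'
--     ]
--
--     output_lower = output.lower()
--     return any(indicator.lower() in output_lower for indicator in vulnerability_indicators)
-- ===== SOURCE B (Python) =====
-- def _check_vulnerability_in_output(output: str) -> bool: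
--     """One left-to-right sliding-window pass: at each position check whether any
--     (pre-lowercased) indicator starts there, instead of seven independent substring scans."""
--     indicators = (
--         'is vulnerable',
--         'injectable parameter',
--         'parameter:',
--         'type:',
--         'title:',
--         'payload:',
--         'sqlmap identified the following injection point',
--     )
--     text = output.lower()
--     for i in range(len(text)):
--         for ind in indicators:
--             if text.startswith(ind, i):
--                 return True
--     return False
-- ===== Notes on version B (the rewrite author's own statement) =====
-- stated objective: alternative
-- what changed: Replaced any() over seven independent substring-containment scans by a single left-to-right sliding-window pass that at each position tests whether any pre-lowercased indicator starts there.
import Mathlib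
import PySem

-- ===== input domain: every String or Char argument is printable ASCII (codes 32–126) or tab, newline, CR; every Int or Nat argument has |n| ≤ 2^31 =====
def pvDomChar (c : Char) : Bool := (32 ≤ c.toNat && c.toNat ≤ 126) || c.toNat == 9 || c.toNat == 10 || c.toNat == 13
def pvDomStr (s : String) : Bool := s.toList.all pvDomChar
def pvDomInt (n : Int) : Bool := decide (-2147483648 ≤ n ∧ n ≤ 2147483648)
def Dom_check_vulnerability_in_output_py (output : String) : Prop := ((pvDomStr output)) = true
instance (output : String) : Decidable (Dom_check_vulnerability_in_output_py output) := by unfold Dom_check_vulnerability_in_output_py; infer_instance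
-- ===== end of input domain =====

-- B replaces seven independent substring ('in') scans by one left-to-right sliding-window
-- pass testing at each position whether any pre-lowercased indicator starts there (alternative, same cost class).


-- ===== PORT A =====
-- A's indicator list, verbatim
def vulnIndicatorsA : List String :=
  ["is vulnerable", "injectable parameter", "Parameter:", "Type:", "Title:", "Payload:",
   "sqlmap identified the following injection point"]

-- any(indicator.lower() in output_lower for indicator in …)
def check_vulnerability_in_output_py (output : String) : Bool :=
  let output_lower := PySem.Str.lower output
  vulnIndicatorsA.any (fun indicator => PySem.Str.isIn (PySem.Str.lower indicator) output_lower)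

-- ===== PORT B =====
-- B's pre-lowercased indicator tuple, verbatim
def vulnIndicatorsB : List String :=
  ["is vulnerable", "injectable parameter", "parameter:", "type:", "title:", "payload:",
   "sqlmap identified the following injection point"]

-- the loop 'for i in range(len(text)): for ind in …: if text.startswith(ind, i): return True'.
-- text.startswith(ind, i) is exactly: ind is a prefix of the suffix of text at i, so the index
-- loop is the structural recursion over successive suffixes (early return = short-circuit ||).
def vulnScanB (cs : List Char) : Bool :=
  match cs with
  | [] => false
  | _ :: rest =>
      vulnIndicatorsB.any (fun ind => PySem.Chars.startswith cs ind.toList) || vulnScanB rest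

def check_vulnerability_in_output_py_alt (output : String) : Bool :=
  vulnScanB (PySem.Chars.lower output.toList)

-- ===== PRECONDITION & SPEC =====
def Spec_check_vulnerability_in_output_py (output : String) (out : Bool) : Prop := out = check_vulnerability_in_output_py_alt output
instance (output : String) (out : Bool) : Decidable (Spec_check_vulnerability_in_output_py output out) := by unfold Spec_check_vulnerability_in_output_py; infer_instance

-- ===== CLAIM (what is proved, stated in full; the proofs are below) =====
def Claim_equal_check_vulnerability_in_output_py : Prop := ∀ (output : String), Dom_check_vulnerability_in_output_py output → Spec_check_vulnerability_in_output_py output (check_vulnerability_in_output_py output)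

-- ===== LEMMAS AND PROOFS =====

-- B's sliding-window scan finds exactly the indicators that occur as an infix
lemma vulnScanB_iff (cs : List Char) :
    vulnScanB cs = true ↔ ∃ ind ∈ vulnIndicatorsB, ind.toList <:+: cs := by
  induction cs with
  | nil =>
      simp only [vulnScanB, Bool.false_eq_true, false_iff]
      rintro ⟨ind, hmem, hinf⟩
      rw [List.infix_nil] at hinf
      fin_cases hmem <;> simp_all
  | cons c rest ih =>
      simp only [vulnScanB, Bool.or_eq_true, List.any_eq_true,
        PySem.Chars.startswith_iff, ih, List.infix_cons_iff]
      constructor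
      · rintro (⟨ind, h1, h2⟩ | ⟨ind, h1, h2⟩) <;> exact ⟨ind, h1, by tauto⟩
      · rintro ⟨ind, h1, h2 | h2⟩
        · exact Or.inl ⟨ind, h1, h2⟩
        · exact Or.inr ⟨ind, h1, h2⟩

-- lowering A's indicator literals yields B's literals (closed computations)
lemma lowerA_eq : vulnIndicatorsA.map PySem.Str.lower = vulnIndicatorsB := by decide

theorem check_vulnerability_in_output_py_spec : Claim_equal_check_vulnerability_in_output_py := by
  intro output _
  unfold Spec_check_vulnerability_in_output_py
  rw [Bool.eq_iff_iff]
  unfold check_vulnerability_in_output_py check_vulnerability_in_output_py_alt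
  rw [vulnScanB_iff]
  simp only [List.any_eq_true, PySem.Str.isIn_iff_infix, PySem.Str.toList_lower]
  constructor
  · rintro ⟨ind, hmem, hinf⟩
    refine ⟨PySem.Str.lower ind, ?_, by simpa using hinf⟩
    rw [← lowerA_eq]; exact List.mem_map_of_mem hmem
  · rintro ⟨ind, hmem, hinf⟩
    rw [← lowerA_eq] at hmem
    obtain ⟨ind0, hmem0, rfl⟩ := List.mem_map.mp hmem
    exact ⟨ind0, hmem0, by simpa using hinf⟩
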